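-- pv_equiv track=rewrite | github.com/patricksomerville/trapdoor-mesh | memory/store.py | _extract_workflow_tags
-- ===== SOURCE A (Python) =====
-- from typing import Any, Dict, Iterable, List, Optional, Sequence, Tuple
--
-- def _extract_workflow_tags(intent: str, steps: List[Dict]) -> List[str]:
--     """Auto-tag workflows based on content"""
--     tags = []
--     intent_lower = intent.lower()
--     steps_str = str(steps).lower()
--
--     # Detect patterns in steps
--     if "git" in steps_str:
--         tags.append("git")
--     if "npm" in steps_str or "package.json" in steps_str:
--         tags.append("nodejs")
--     if "test" in steps_str:
--         tags.append("testing")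
--     if "python" in steps_str or ".py" in steps_str:
--         tags.append("python")
--     if "docker" in steps_str:
--         tags.append("docker")
--
--     # Detect patterns in intent
--     if any(word in intent_lower for word in ["deploy", "release", "publish"]):
--         tags.append("deployment")
--     if any(word in intent_lower for word in ["check", "status", "verify"]):
--         tags.append("status_check")
--
--     return tags
-- ===== SOURCE B (Python) =====
-- _STEP_WORDS = ["git", "npm", "package.json", "test", "python", ".py", "docker"]
-- _INTENT_WORDS = ["deploy", "release", "publish", "check", "status", "verify"]
--
--
-- def _scan_keywords(hay, words):
--     """Single left-to-right scan of hay: at each position collect every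
--     keyword that starts there (multi-pattern scan instead of per-keyword
--     substring searches)."""
--     found = set()
--     for i in range(len(hay)):
--         for w in words:
--             if hay.startswith(w, i):
--                 found.add(w)
--     return found
--
--
-- def _extract_workflow_tags(intent, steps):
--     """Auto-tag workflows based on content"""
--     s = _scan_keywords(str(steps).lower(), _STEP_WORDS)
--     t = _scan_keywords(intent.lower(), _INTENT_WORDS)
--     tags = []
--     if "git" in s:
--         tags.append("git")
--     if "npm" in s or "package.json" in s:
--         tags.append("nodejs")
--     if "test" in s:
--         tags.append("testing")
--     if "python" in s or ".py" in s:
--         tags.append("python")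
--     if "docker" in s:
--         tags.append("docker")
--     if "deploy" in t or "release" in t or "publish" in t:
--         tags.append("deployment")
--     if "check" in t or "status" in t or "verify" in t:
--         tags.append("status_check")
--     return tags
-- ===== Notes on version B (the rewrite author's own statement) =====
-- stated objective: alternative
-- what changed: Keyword detection is a single left-to-right positional scan of each haystack (collecting every keyword that starts at each offset into a found-set), with tags then emitted from set membership, instead of A's seven independent substring ('in') searches.
import Mathlib
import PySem

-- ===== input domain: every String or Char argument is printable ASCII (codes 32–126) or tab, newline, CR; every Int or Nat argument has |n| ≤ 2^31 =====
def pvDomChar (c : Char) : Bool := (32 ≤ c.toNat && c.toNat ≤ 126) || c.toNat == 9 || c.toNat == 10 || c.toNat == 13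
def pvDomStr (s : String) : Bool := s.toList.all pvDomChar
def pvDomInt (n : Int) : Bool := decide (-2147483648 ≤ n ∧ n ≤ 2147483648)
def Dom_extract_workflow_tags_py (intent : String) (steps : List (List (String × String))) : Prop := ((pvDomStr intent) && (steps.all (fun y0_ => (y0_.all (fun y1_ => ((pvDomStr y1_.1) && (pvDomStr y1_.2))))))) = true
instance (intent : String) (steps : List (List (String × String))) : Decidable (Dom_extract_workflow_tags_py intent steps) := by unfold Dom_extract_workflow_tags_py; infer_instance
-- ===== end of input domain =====

-- B detects keywords by a single positional scan of each haystack (collecting into a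
-- found-set every keyword that starts at each offset) and emits tags from set membership,
-- instead of A's per-keyword substring searches. Alternative algorithm; not faster.



-- ===== PORT A =====
-- str(steps) for a list of string-keyed/valued dicts, transliterating CPython's repr on the
-- printable-ASCII + tab/newline/CR domain (quote choice, backslash/\t/\n/\r and quote escapes,
-- duplicate dict keys collapsed to first position / last value as a Python dict would).
def pyReprChar (q : Char) (c : Char) : List Char :=
  if c = '\\' then ['\\', '\\']
  else if c = '\t' then ['\\', 't']
  else if c = '\n' then ['\\', 'n']
  else if c = '\r' then ['\\', 'r']
  else if c = q then ['\\', q]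
  else [c]

def pyReprStr (s : String) : List Char :=
  let cs := s.toList
  let q : Char := if '\'' ∈ cs ∧ ¬ '"' ∈ cs then '"' else '\''
  q :: cs.flatMap (pyReprChar q) ++ [q]

def pyReprDict (d : List (String × String)) : List Char :=
  '{' :: PySem.Chars.join [',', ' ']
    (((PySem.Dict.ofList d).items).map (fun p => pyReprStr p.1 ++ [':', ' '] ++ pyReprStr p.2)) ++ ['}']

def pyStrSteps (steps : List (List (String × String))) : String :=
  String.ofList ('[' :: PySem.Chars.join [',', ' '] (steps.map pyReprDict) ++ [']'])

def extract_workflow_tags_py (intent : String) (steps : List (List (String × String))) : List String :=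
  let tags : List String := []
  let intent_lower := PySem.Str.lower intent
  let steps_str := PySem.Str.lower (pyStrSteps steps)
  let tags := if PySem.Str.isIn "git" steps_str then tags ++ ["git"] else tags
  let tags := if PySem.Str.isIn "npm" steps_str || PySem.Str.isIn "package.json" steps_str then tags ++ ["nodejs"] else tags
  let tags := if PySem.Str.isIn "test" steps_str then tags ++ ["testing"] else tags
  let tags := if PySem.Str.isIn "python" steps_str || PySem.Str.isIn ".py" steps_str then tags ++ ["python"] else tags
  let tags := if PySem.Str.isIn "docker" steps_str then tags ++ ["docker"] else tags
  let tags := if (["deploy", "release", "publish"].any (fun w => PySem.Str.isIn w intent_lower)) then tags ++ ["deployment"] else tags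
  let tags := if (["check", "status", "verify"].any (fun w => PySem.Str.isIn w intent_lower)) then tags ++ ["status_check"] else tags
  tags

-- ===== PORT B =====
def pvStepWords : List String := ["git", "npm", "package.json", "test", "python", ".py", "docker"]
def pvIntentWords : List String := ["deploy", "release", "publish", "check", "status", "verify"]

-- hay.startswith(w, i) for 0 ≤ i < len(hay) is exactly: w is a prefix of the suffix at i.
def scan_keywords (hay : String) (words : List String) : PySem.Set String :=
  (List.range hay.toList.length).foldl
    (fun found i =>
      words.foldl
        (fun f w => if PySem.Chars.startswith (hay.toList.drop i) w.toList then PySem.Set.add f w else f)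
        found)
    PySem.Set.empty

def extract_workflow_tags_py_alt (intent : String) (steps : List (List (String × String))) : List String :=
  let s := scan_keywords (PySem.Str.lower (pyStrSteps steps)) pvStepWords
  let t := scan_keywords (PySem.Str.lower intent) pvIntentWords
  let tags : List String := []
  let tags := if PySem.Set.contains s "git" then tags ++ ["git"] else tags
  let tags := if PySem.Set.contains s "npm" || PySem.Set.contains s "package.json" then tags ++ ["nodejs"] else tags
  let tags := if PySem.Set.contains s "test" then tags ++ ["testing"] else tags
  let tags := if PySem.Set.contains s "python" || PySem.Set.contains s ".py" then tags ++ ["python"] else tags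
  let tags := if PySem.Set.contains s "docker" then tags ++ ["docker"] else tags
  let tags := if PySem.Set.contains t "deploy" || PySem.Set.contains t "release" || PySem.Set.contains t "publish" then tags ++ ["deployment"] else tags
  let tags := if PySem.Set.contains t "check" || PySem.Set.contains t "status" || PySem.Set.contains t "verify" then tags ++ ["status_check"] else tags
  tags

-- ===== PRECONDITION & SPEC =====
def Spec_extract_workflow_tags_py (intent : String) (steps : List (List (String × String))) (out : List String) : Prop := out = extract_workflow_tags_py_alt intent steps
instance (intent : String) (steps : List (List (String × String))) (out : List String) : Decidable (Spec_extract_workflow_tags_py intent steps out) := by unfold Spec_extract_workflow_tags_py; infer_instance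

-- ===== CLAIM =====
def Claim_equal_extract_workflow_tags_py : Prop := ∀ (intent : String) (steps : List (List (String × String))), Dom_extract_workflow_tags_py intent steps → Spec_extract_workflow_tags_py intent steps (extract_workflow_tags_py intent steps)

-- ===== LEMMAS AND PROOFS =====
theorem mem_foldl_add_if {q : String → Bool} (ws : List String) (f : PySem.Set String) (x : String) :
    x ∈ ws.foldl (fun f w => if q w then PySem.Set.add f w else f) f ↔ x ∈ f ∨ (x ∈ ws ∧ q x = true) := by
  induction ws generalizing f with
  | nil => simp
  | cons w ws ih =>
      simp only [List.foldl_cons, ih, List.mem_cons]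
      by_cases hw : q w
      · simp only [hw, if_pos, PySem.Set.mem_add]
        constructor
        · rintro (⟨h | h⟩ | h)
          · exact Or.inl h
          · exact Or.inr ⟨Or.inl h, by subst h; exact hw⟩
          · exact Or.inr ⟨Or.inr h.1, h.2⟩
        · rintro (h | ⟨h | h, hq⟩)
          · exact Or.inl (Or.inl h)
          · exact Or.inl (Or.inr h)
          · exact Or.inr ⟨h, hq⟩
      · simp only [hw, if_neg, Bool.not_eq_true]
        constructor
        · rintro (h | h)
          · exact Or.inl h
          · exact Or.inr ⟨Or.inr h.1, h.2⟩
        · rintro (h | ⟨h | h, hq⟩)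
          · exact Or.inl h
          · subst h; exact absurd hq (by simpa using hw)
          · exact Or.inr ⟨h, hq⟩

theorem mem_scan_range (hay : String) (words : List String) (n : ℕ) (x : String) :
    x ∈ (List.range n).foldl
        (fun found i =>
          words.foldl
            (fun f w => if PySem.Chars.startswith (hay.toList.drop i) w.toList then PySem.Set.add f w else f)
            found)
        PySem.Set.empty
      ↔ x ∈ words ∧ ∃ i < n, PySem.Chars.startswith (hay.toList.drop i) x.toList = true := by
  induction n with
  | zero => simp [PySem.Set.empty]
  | succ n ih =>
      rw [List.range_succ, List.foldl_append, List.foldl_cons, List.foldl_nil, mem_foldl_add_if, ih]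
      constructor
      · rintro (⟨hm, i, hi, hs⟩ | ⟨hm, hs⟩)
        · exact ⟨hm, i, Nat.lt_succ_of_lt hi, hs⟩
        · exact ⟨hm, n, Nat.lt_succ_self n, hs⟩
      · rintro ⟨hm, i, hi, hs⟩
        rcases Nat.lt_succ_iff_lt_or_eq.mp hi with h | h
        · exact Or.inl ⟨hm, i, h, hs⟩
        · exact Or.inr ⟨hm, h ▸ hs⟩

-- the bridge: for a nonempty keyword in the word list, set membership after the scan = 'w in hay'
theorem contains_scan (hay : String) (words : List String) (w : String)
    (hmem : w ∈ words) (hne : w.toList ≠ []) :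
    PySem.Set.contains (scan_keywords hay words) w = PySem.Str.isIn w hay := by
  have hmemiff : w ∈ scan_keywords hay words ↔ PySem.Str.isIn w hay = true := by
    rw [scan_keywords, mem_scan_range, PySem.Str.isIn_eq,
        ← PySem.Chars.exists_prefix_drop_iff_isIn]
    constructor
    · rintro ⟨_, i, _, hs⟩
      exact ⟨i, (PySem.Chars.startswith_iff _ _).mp hs⟩
    · rintro ⟨j, hj⟩
      refine ⟨hmem, ?_⟩
      have hjlt : j < hay.toList.length := by
        by_contra h
        rw [not_lt] at h
        rw [List.drop_eq_nil_of_le h] at hj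
        exact hne (List.prefix_nil.mp hj)
      exact ⟨j, hjlt, (PySem.Chars.startswith_iff _ _).mpr hj⟩
  have h1 : (PySem.Set.contains (scan_keywords hay words) w = true) ↔ w ∈ scan_keywords hay words := by
    simp [PySem.Set.contains]
  rw [Bool.eq_iff_iff, h1]
  exact hmemiff

-- ===== VERDICT =====
theorem extract_workflow_tags_py_spec : Claim_equal_extract_workflow_tags_py := by
  intro intent steps _
  unfold Spec_extract_workflow_tags_py extract_workflow_tags_py extract_workflow_tags_py_alt
  simp only [contains_scan _ pvStepWords "git" (by decide) (by decide),
      contains_scan _ pvStepWords "npm" (by decide) (by decide),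
      contains_scan _ pvStepWords "package.json" (by decide) (by decide),
      contains_scan _ pvStepWords "test" (by decide) (by decide),
      contains_scan _ pvStepWords "python" (by decide) (by decide),
      contains_scan _ pvStepWords ".py" (by decide) (by decide),
      contains_scan _ pvStepWords "docker" (by decide) (by decide),
      contains_scan _ pvIntentWords "deploy" (by decide) (by decide),
      contains_scan _ pvIntentWords "release" (by decide) (by decide),
      contains_scan _ pvIntentWords "publish" (by decide) (by decide),
      contains_scan _ pvIntentWords "check" (by decide) (by decide),
      contains_scan _ pvIntentWords "status" (by decide) (by decide),
      contains_scan _ pvIntentWords "verify" (by decide) (by decide)]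
  simp only [List.any_cons, List.any_nil, Bool.or_false, Bool.or_assoc]
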